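-- pv_equiv track=rewrite | github.com/CalebMathers/advent-of-code | 2015/day_3.py | move_and_deliver
-- ===== SOURCE A (Python) =====
-- def move_and_deliver(movements: str) -> dict:
--     """Returns the number of house locations with at least one present"""
--     x_loc = 0
--     y_loc = 0
--
--     # Deliver to the first house
--     delivered = {}
--     delivered[f"{x_loc}:{y_loc}"] = 1
--
--     # Go through every movement and change x or y location
--     for movement in movements:
--         if movement == "^":
--             y_loc += 1
--         elif movement == "v":
--             y_loc -= 1
--         elif movement == ">":
--             x_loc += 1
--         else:
--             x_loc -= 1
--
--         # Deliver to the house at the location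
--         if delivered.get(f"{x_loc}:{y_loc}"):
--             delivered[f"{x_loc}:{y_loc}"] += 1
--         else:
--             delivered[f"{x_loc}:{y_loc}"] = 1
--
--     return delivered
-- ===== SOURCE B (Python) =====
-- def move_and_deliver(movements: str) -> dict:
--     """Returns the number of house locations with at least one present"""
--     deltas = {"^": (0, 1), "v": (0, -1), ">": (1, 0)}
--
--     # Phase 1: generate the full walk, starting at the origin.
--     visits = [(0, 0)]
--     for movement in movements:
--         dx, dy = deltas.get(movement, (-1, 0))
--         x, y = visits[-1]
--         visits.append((x + dx, y + dy))
--
--     # Phase 2: tally presents per house.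
--     delivered = {}
--     for x, y in visits:
--         key = f"{x}:{y}"
--         delivered[key] = delivered.get(key, 0) + 1
--     return delivered
-- ===== Notes on version B (the rewrite author's own statement) =====
-- stated objective: alternative
-- what changed: B splits the interleaved walk-and-count loop into two passes: a delta-map drives generation of the full visited-coordinate list, which is then tallied into a dict in a separate counting pass.
import Mathlib
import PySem

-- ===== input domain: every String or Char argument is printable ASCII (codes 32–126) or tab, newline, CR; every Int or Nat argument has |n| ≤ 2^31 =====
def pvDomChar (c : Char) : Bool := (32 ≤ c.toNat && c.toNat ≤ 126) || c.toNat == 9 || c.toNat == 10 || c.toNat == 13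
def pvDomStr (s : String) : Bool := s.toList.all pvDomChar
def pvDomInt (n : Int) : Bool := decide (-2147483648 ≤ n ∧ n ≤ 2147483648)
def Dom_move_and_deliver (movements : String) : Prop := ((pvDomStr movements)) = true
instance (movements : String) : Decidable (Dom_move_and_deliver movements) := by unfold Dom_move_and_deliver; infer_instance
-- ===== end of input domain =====

-- B replaces A's single interleaved walk-and-count loop by two passes: generate the
-- visited-coordinate list from a delta map, then tally it (objective: alternative decomposition).

-- shared formatting helper: f"{x}:{y}"
def pvKey (x y : Int) : String :=
  String.ofList (PySem.Int.toChars x ++ [':'] ++ PySem.Int.toChars y)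

-- ===== PORT A =====
-- loop body of A's single for-loop, step for step
def pvStepA (s : Int × Int × PySem.Dict String Int) (c : Char) :
    Int × Int × PySem.Dict String Int :=
  let xy : Int × Int :=
    if c = '^' then (s.1, s.2.1 + 1)
    else if c = 'v' then (s.1, s.2.1 - 1)
    else if c = '>' then (s.1 + 1, s.2.1)
    else (s.1 - 1, s.2.1)
  let k := pvKey xy.1 xy.2
  if PySem.Dict.getD s.2.2 k 0 ≠ 0 then
    (xy.1, xy.2, PySem.Dict.insert s.2.2 k (PySem.Dict.getD s.2.2 k 0 + 1))
  else
    (xy.1, xy.2, PySem.Dict.insert s.2.2 k 1)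

def move_and_deliver (movements : String) : List (String × Int) :=
  (movements.toList.foldl pvStepA
    (0, 0, PySem.Dict.insert (PySem.Dict.empty : PySem.Dict String Int) (pvKey 0 0) 1)).2.2.items

-- ===== PORT B =====
def pvDeltas : PySem.Dict Char (Int × Int) := ⟨[('^', (0, 1)), ('v', (0, -1)), ('>', (1, 0))]⟩

-- phase-1 loop body: extend the walk by one step (visits[-1] + delta)
def pvVisitStep (vs : List (Int × Int)) (c : Char) : List (Int × Int) :=
  let d := PySem.Dict.getD pvDeltas c (-1, 0)
  let p := PySem.List.pyGetD vs (-1) (0, 0)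
  vs ++ [(p.1 + d.1, p.2 + d.2)]

-- phase-2 loop body: count one visited house
def pvTally (counts : PySem.Dict String Int) (p : Int × Int) : PySem.Dict String Int :=
  let k := pvKey p.1 p.2
  PySem.Dict.insert counts k (PySem.Dict.getD counts k 0 + 1)

def move_and_deliver_alt (movements : String) : List (String × Int) :=
  ((movements.toList.foldl pvVisitStep [(0, 0)]).foldl pvTally PySem.Dict.empty).items

-- ===== PRECONDITION & SPEC =====
def Spec_move_and_deliver (movements : String) (out : List (String × Int)) : Prop :=
  out = move_and_deliver_alt movements
instance (movements : String) (out : List (String × Int)) :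
    Decidable (Spec_move_and_deliver movements out) := by
  unfold Spec_move_and_deliver; infer_instance

-- ===== CLAIM (what is proved, stated in full; the proofs are below) =====
def Claim_equal_move_and_deliver : Prop :=
  ∀ (movements : String), Dom_move_and_deliver movements →
    Spec_move_and_deliver movements (move_and_deliver movements)

-- ===== LEMMAS AND PROOFS =====

-- one movement as a pure position update
def pvMove (p : Int × Int) (c : Char) : Int × Int :=
  if c = '^' then (p.1, p.2 + 1)
  else if c = 'v' then (p.1, p.2 - 1)
  else if c = '>' then (p.1 + 1, p.2)
  else (p.1 - 1, p.2)

-- the sequence of positions visited after the start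
def pvWalk (p : Int × Int) : List Char → List (Int × Int)
  | [] => []
  | c :: cs => pvMove p c :: pvWalk (pvMove p c) cs

theorem pvStepA_eq (x y : Int) (d : PySem.Dict String Int) (c : Char) :
    pvStepA (x, y, d) c = ((pvMove (x, y) c).1, (pvMove (x, y) c).2, pvTally d (pvMove (x, y) c)) := by
  simp only [pvStepA, pvMove, pvTally]
  split_ifs <;> simp_all

theorem pvFoldA_eq (cs : List Char) : ∀ (x y : Int) (d : PySem.Dict String Int),
    (cs.foldl pvStepA (x, y, d)).2.2 = (pvWalk (x, y) cs).foldl pvTally d := by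
  induction cs with
  | nil => intro x y d; rfl
  | cons c cs ih =>
    intro x y d
    simp only [List.foldl, pvWalk, pvStepA_eq]
    exact ih _ _ _

theorem pvDelta_eq (p : Int × Int) (c : Char) :
    (p.1 + (PySem.Dict.getD pvDeltas c (-1, 0)).1,
     p.2 + (PySem.Dict.getD pvDeltas c (-1, 0)).2) = pvMove p c := by
  by_cases h1 : c = '^'
  · subst h1
    simp [pvDeltas, pvMove, PySem.Dict.getD_eq_get?_getD, PySem.Dict.get?_mk_cons]
  · by_cases h2 : c = 'v'
    · subst h2
      simp [pvDeltas, pvMove, PySem.Dict.getD_eq_get?_getD, PySem.Dict.get?_mk_cons,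
        Prod.ext_iff]
      omega
    · by_cases h3 : c = '>'
      · subst h3
        simp [pvDeltas, pvMove, PySem.Dict.getD_eq_get?_getD, PySem.Dict.get?_mk_cons]
      · simp [pvDeltas, pvMove, PySem.Dict.getD_eq_get?_getD,
          PySem.Dict.get?, h1, h2, h3, Ne.symm h1, Ne.symm h2, Ne.symm h3,
          Prod.ext_iff]
        omega

theorem pvFoldB_eq (cs : List Char) : ∀ (ws : List (Int × Int)) (p : Int × Int),
    cs.foldl pvVisitStep (ws ++ [p]) = ws ++ [p] ++ pvWalk p cs := by
  induction cs with
  | nil => intro ws p; simp [pvWalk]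
  | cons c cs ih =>
    intro ws p
    have hstep : pvVisitStep (ws ++ [p]) c = (ws ++ [p]) ++ [pvMove p c] := by
      simp only [pvVisitStep, PySem.List.pyGetD_neg_one_append_singleton, pvDelta_eq]
    simp only [List.foldl, hstep, ih (ws ++ [p]) (pvMove p c), pvWalk]
    simp
 
-- ===== VERDICT (by name: the statement is the Claim_ definition above) =====
theorem move_and_deliver_spec : Claim_equal_move_and_deliver := by
  intro m _
  unfold Spec_move_and_deliver move_and_deliver move_and_deliver_alt
  have hb := pvFoldB_eq m.toList [] (0, 0)
  simp only [List.nil_append] at hb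
  rw [hb, pvFoldA_eq]
  have h0 : pvTally (PySem.Dict.empty : PySem.Dict String Int) (0, 0) =
      PySem.Dict.insert (PySem.Dict.empty : PySem.Dict String Int) (pvKey 0 0) 1 := by
    simp [pvTally, PySem.Dict.getD_empty]
  simp [h0]
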